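-- pv_equiv track=rewrite | github.com/ItamarRocha/DailyByte | week_013/day87_reapchildren.py | reapchildren
-- ===== SOURCE A (Python) =====
-- def reapchildren(pid, ppid, kill):
--     ppid_relation = {}
--     for p, pp in zip(pid,ppid):
--         if pp not in ppid_relation:
--             ppid_relation[pp] = [p]
--         else:
--             ppid_relation[pp].append(p)
--
--     output = []
--     recurse(ppid_relation, kill, output)
--
--     return output
--
-- def recurse(ppid_relation, cur_pid, output):
--     output.append(cur_pid)
--     if cur_pid in ppid_relation:
--         for child in ppid_relation[cur_pid]:
--             recurse(ppid_relation, child, output)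
--     return
-- ===== SOURCE B (Python) =====
-- def reapchildren(pid, ppid, kill):
--     output = []
--     stack = [kill]
--     while stack:
--         node = stack.pop()
--         output.append(node)
--         children = [p for p, pp in zip(pid, ppid) if pp == node]
--         for c in reversed(children):
--             stack.append(c)
--     return output
-- ===== Notes on version B (the rewrite author's own statement) =====
-- stated objective: alternative
-- what changed: B drops the parent->children dict entirely and the recursive helper: a single inlined iterative DFS with an explicit stack computes each node's children on demand by filtering zip(pid, ppid), pushing them reversed so the recursive preorder is preserved.
import Mathlib
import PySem

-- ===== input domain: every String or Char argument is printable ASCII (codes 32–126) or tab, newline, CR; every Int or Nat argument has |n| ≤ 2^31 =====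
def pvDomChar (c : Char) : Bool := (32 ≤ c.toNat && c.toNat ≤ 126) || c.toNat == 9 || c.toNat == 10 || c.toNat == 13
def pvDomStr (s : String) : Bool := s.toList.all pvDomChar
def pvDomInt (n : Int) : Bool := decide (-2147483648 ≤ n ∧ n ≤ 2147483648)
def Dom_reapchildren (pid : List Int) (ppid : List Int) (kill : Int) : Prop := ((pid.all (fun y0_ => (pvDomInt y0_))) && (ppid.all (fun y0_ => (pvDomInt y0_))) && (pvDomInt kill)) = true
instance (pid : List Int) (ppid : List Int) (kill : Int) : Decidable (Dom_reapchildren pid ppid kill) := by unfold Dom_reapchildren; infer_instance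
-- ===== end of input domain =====

-- B drops the dict and the recursive helper: an iterative stack DFS filters the edge list for children on demand; equivalence is about the return value only.

-- ===== PORT A =====
-- dict build: for p, pp in zip(pid, ppid): if pp not in d: d[pp] = [p] else: d[pp].append(p)
def buildRelA (l : List (Int × Int)) : PySem.Dict Int (List Int) :=
  l.foldl (fun d pr =>
    if d.contains pr.2 = false then d.insert pr.2 [pr.1]
    else d.insert pr.2 (d.getD pr.2 [] ++ [pr.1])) PySem.Dict.empty

-- recurse(d, cur, output): output.append(cur); if cur in d: for child in d[cur]: recurse …
-- fuel is a totality guard only (Python's recursion has none); it bounds the recursion DEPTH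
-- and never runs out on inputs satisfying Pre_reapchildren.
def recurseA (d : PySem.Dict Int (List Int)) (cur : Int) (out : List Int) : Nat → List Int
  | 0 => out
  | f + 1 =>
    let out' := out ++ [cur]
    if d.contains cur then (d.getD cur []).foldl (fun o c => recurseA d c o f) out'
    else out'

def reapchildren (pid : List Int) (ppid : List Int) (kill : Int) : List Int :=
  recurseA (buildRelA (pid.zip ppid)) kill [] (pid.length + 1)

-- ===== PORT B =====
-- while stack: node = stack.pop(); output.append(node);
--   children = [p for p, pp in zip(pid, ppid) if pp == node]; for c in reversed(children): stack.append(c)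
-- the stack is modeled top-at-head, so Python's push-reversed equals prepending the children list.
-- fuel is a totality guard only; it bounds the number of loop iterations and never runs out under Pre_.
def loopB (l : List (Int × Int)) (stack : List Int) (out : List Int) : Nat → List Int
  | 0 => out
  | f + 1 =>
    match stack with
    | [] => out
    | node :: rest =>
      loopB l ((l.filter (fun pr => pr.2 == node)).map (·.1) ++ rest) (out ++ [node]) f

def reapchildren_alt (pid : List Int) (ppid : List Int) (kill : Int) : List Int :=
  loopB (pid.zip ppid) [kill] [] ((pid.length + 1) ^ (pid.length + 1))

-- ===== PRECONDITION & SPEC =====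
-- one step of the parent→child frontier of the zip(pid, ppid) edge list
def nextFront (l : List (Int × Int)) (S : List Int) : List Int :=
  PySem.List.dedup ((l.filter (fun pr => S.contains pr.2)).map (·.1))

-- Pre_ excludes exactly the inputs on which A's recursion never terminates (Python raises
-- RecursionError): a cycle of the parent→child relation is reachable from kill iff some
-- parent→child path of length pid.length + 1 starts at kill, i.e. the iterated frontier is nonempty.
def Pre_reapchildren (pid : List Int) (ppid : List Int) (kill : Int) : Prop :=
  (nextFront (pid.zip ppid))^[pid.length + 1] [kill] = []
instance (pid : List Int) (ppid : List Int) (kill : Int) : Decidable (Pre_reapchildren pid ppid kill) := by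
  unfold Pre_reapchildren; infer_instance

def pvWitness_reapchildren : List Int × List Int × Int := ([2, 3, 4], [1, 1, 2], 1)

def Spec_reapchildren (pid : List Int) (ppid : List Int) (kill : Int) (out : List Int) : Prop := out = reapchildren_alt pid ppid kill
instance (pid : List Int) (ppid : List Int) (kill : Int) (out : List Int) : Decidable (Spec_reapchildren pid ppid kill out) := by unfold Spec_reapchildren; infer_instance

-- ===== CLAIM =====
def Claim_equal_reapchildren : Prop := ∀ (pid : List Int) (ppid : List Int) (kill : Int), Dom_reapchildren pid ppid kill → Pre_reapchildren pid ppid kill → Spec_reapchildren pid ppid kill (reapchildren pid ppid kill)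

-- ===== LEMMAS AND PROOFS =====

-- children of a node, read off the edge list
def childrenOf (l : List (Int × Int)) (v : Int) : List Int :=
  (l.filter (fun pr => pr.2 == v)).map (·.1)

-- reference preorder DFS with fuel bounding the depth (proof-only)
mutual
def dfsF (ch : Int → List Int) : Nat → Int → Option (List Int)
  | 0, _ => none
  | f + 1, v => (dfsAll ch f (ch v)).map (fun t => v :: t)
def dfsAll (ch : Int → List Int) : Nat → List Int → Option (List Int)
  | _, [] => some []
  | f, c :: cs => do
      let l ← dfsF ch f c
      let r ← dfsAll ch f cs
      pure (l ++ r)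
end

theorem getD_buildRelA (l : List (Int × Int)) (d : PySem.Dict Int (List Int)) (c : Int) :
    (l.foldl (fun d pr =>
      if d.contains pr.2 = false then d.insert pr.2 [pr.1]
      else d.insert pr.2 (d.getD pr.2 [] ++ [pr.1])) d).getD c []
    = d.getD c [] ++ childrenOf l c := by
  induction l generalizing d with
  | nil => simp [childrenOf]
  | cons pr rest ih =>
    simp only [List.foldl_cons]
    by_cases hc : d.contains pr.2 = false
    · rw [if_pos hc, ih]
      by_cases h : pr.2 = c
      · subst h
        rw [PySem.Dict.getD_of_not_contains _ _ hc]
        simp [childrenOf]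
      · simp [childrenOf, PySem.Dict.getD_insert, h, Ne.symm h]
    · rw [if_neg hc, ih]
      by_cases h : pr.2 = c
      · subst h; simp [childrenOf]
      · simp [childrenOf, PySem.Dict.getD_insert, h, Ne.symm h]

theorem contains_buildRelA (l : List (Int × Int)) (d : PySem.Dict Int (List Int)) (c : Int) :
    (l.foldl (fun d pr =>
      if d.contains pr.2 = false then d.insert pr.2 [pr.1]
      else d.insert pr.2 (d.getD pr.2 [] ++ [pr.1])) d).contains c
    = (d.contains c || l.any (fun pr => pr.2 == c)) := by
  induction l generalizing d with
  | nil => simp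
  | cons pr rest ih =>
    simp only [List.foldl_cons]
    by_cases hc : d.contains pr.2 = false
    · rw [if_pos hc, ih, PySem.Dict.contains_insert]
      simp [Bool.or_left_comm, Bool.or_assoc, BEq.comm]
    · rw [if_neg hc, ih, PySem.Dict.contains_insert]
      simp [Bool.or_left_comm, Bool.or_assoc, BEq.comm]

theorem childrenOf_ne_nil_iff (l : List (Int × Int)) (v : Int) :
    childrenOf l v ≠ [] ↔ l.any (fun pr => pr.2 == v) = true := by
  constructor
  · intro h
    obtain ⟨x, hx⟩ := List.exists_mem_of_ne_nil _ h
    simp only [childrenOf, List.mem_map, List.mem_filter] at hx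
    obtain ⟨pr, ⟨hm, he⟩, _⟩ := hx
    exact List.any_eq_true.mpr ⟨pr, hm, he⟩
  · intro h hnil
    obtain ⟨pr, hm, he⟩ := List.any_eq_true.mp h
    have hmem : pr.1 ∈ childrenOf l v := by
      simp only [childrenOf, List.mem_map, List.mem_filter]
      exact ⟨pr, ⟨hm, he⟩, rfl⟩
    rw [hnil] at hmem
    exact List.not_mem_nil hmem

-- A's recursion computes the reference DFS whenever the latter's fuel suffices
theorem recurseA_eq_dfsF (d : PySem.Dict Int (List Int)) (ch : Int → List Int)
    (hget : ∀ v, d.getD v [] = ch v)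
    (hcon : ∀ v, d.contains v = true ↔ ch v ≠ []) :
    ∀ f, (∀ v out l, dfsF ch f v = some l → recurseA d v out f = out ++ l) := by
  intro f
  induction f with
  | zero => intro v out l h; simp [dfsF] at h
  | succ f ih =>
    have hall : ∀ cs out t, dfsAll ch f cs = some t →
        cs.foldl (fun o c => recurseA d c o f) out = out ++ t := by
      intro cs
      induction cs with
      | nil => intro out t h; simp [dfsAll] at h; subst h; simp
      | cons c cs ihc =>
        intro out t h
        simp only [dfsAll, Option.bind_eq_bind, Option.bind_eq_some_iff] at h
        obtain ⟨l₁, h₁, r, hr, ht⟩ := h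
        simp only [Option.pure_def, Option.some.injEq] at ht
        simp only [List.foldl_cons]
        rw [ih c out l₁ h₁, ihc (out ++ l₁) r hr, ← ht, List.append_assoc]
    intro v out l h
    simp only [dfsF, Option.map_eq_some_iff] at h
    obtain ⟨t, hT, hl⟩ := h
    by_cases hc : ch v = []
    · rw [hc] at hT
      simp [dfsAll] at hT
      have hcv : ¬ d.contains v = true := fun hcontra => (hcon v).mp hcontra hc
      simp only [recurseA]
      rw [if_neg hcv, ← hl, ← hT]
    · have : d.contains v = true := (hcon v).mpr hc
      simp only [recurseA]
      rw [if_pos this, hget v, hall (ch v) (out ++ [v]) t hT, ← hl]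
      simp

-- a successful DFS result starts with its root
theorem dfsF_head (ch : Int → List Int) (f : Nat) (v : Int) (l : List Int)
    (h : dfsF ch f v = some l) : ∃ t, l = v :: t := by
  cases f with
  | zero => simp [dfsF] at h
  | succ f =>
    simp only [dfsF, Option.map_eq_some_iff] at h
    obtain ⟨t, _, hl⟩ := h
    exact ⟨t, hl.symm⟩

def RelDfs (ch : Int → List Int) (v : Int) (l : List Int) : Prop := ∃ f, dfsF ch f v = some l

theorem dfsAll_forall₂ (ch : Int → List Int) (f : Nat) :
    ∀ cs t, dfsAll ch f cs = some t →
      ∃ ts, List.Forall₂ (RelDfs ch) cs ts ∧ ts.flatten = t := by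
  intro cs
  induction cs with
  | nil => intro t h; simp [dfsAll] at h; exact ⟨[], List.Forall₂.nil, by simp [h.symm]⟩
  | cons c cs ihc =>
    intro t h
    simp only [dfsAll, Option.bind_eq_bind, Option.bind_eq_some_iff] at h
    obtain ⟨l₁, h₁, r, hr, ht⟩ := h
    simp only [Option.pure_def, Option.some.injEq] at ht
    obtain ⟨ts, hts, hfl⟩ := ihc r hr
    exact ⟨l₁ :: ts, List.Forall₂.cons ⟨f, h₁⟩ hts, by simp [hfl, ht]⟩

-- B's stack loop computes the concatenation of the DFS results of the stack entries
theorem loopB_eq (l : List (Int × Int)) :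
    ∀ F st ls out, List.Forall₂ (RelDfs (childrenOf l)) st ls → ls.flatten.length ≤ F →
      loopB l st out F = out ++ ls.flatten := by
  intro F
  induction F with
  | zero =>
    intro st ls out hrel hlen
    cases hrel with
    | nil => simp [loopB]
    | cons hv hrest =>
      rename_i v lv st' ls'
      obtain ⟨f, hf⟩ := hv
      obtain ⟨t, ht⟩ := dfsF_head _ f v lv hf
      subst ht; simp at hlen
  | succ F ih =>
    intro st ls out hrel hlen
    cases hrel with
    | nil => simp [loopB]
    | cons hv hrest =>
      rename_i v lv st' ls'
      obtain ⟨f, hf⟩ := hv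
      cases f with
      | zero => simp [dfsF] at hf
      | succ f =>
        simp only [dfsF, Option.map_eq_some_iff] at hf
        obtain ⟨t, hT, hl⟩ := hf
        obtain ⟨ts, hts, hfl⟩ := dfsAll_forall₂ (childrenOf l) f (childrenOf l v) t hT
        simp only [loopB]
        have hrel' : List.Forall₂ (RelDfs (childrenOf l)) (childrenOf l v ++ st') (ts ++ ls') :=
          List.rel_append hts hrest
        have hlen' : ((ts ++ ls').flatten).length ≤ F := by
          simp only [List.flatten_append, List.length_append] at hlen ⊢
          rw [← hl] at hlen
          simp only [List.flatten_cons, List.length_append, List.length_cons] at hlen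
          rw [hfl]
          omega
        have hstep := ih (childrenOf l v ++ st') (ts ++ ls') (out ++ [v]) hrel' hlen'
        simp only [childrenOf] at hstep
        rw [hstep, ← hl]
        simp [hfl]

-- frontier monotonicity
theorem nextFront_mono (l : List (Int × Int)) (S T : List Int) (h : ∀ x ∈ S, x ∈ T) :
    ∀ x ∈ nextFront l S, x ∈ nextFront l T := by
  intro x hx
  simp only [nextFront, PySem.List.mem_dedup, List.mem_map, List.mem_filter] at hx ⊢
  obtain ⟨pr, ⟨hm, hc⟩, hx⟩ := hx
  refine ⟨pr, ⟨hm, ?_⟩, hx⟩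
  simp only [List.contains_eq_mem, decide_eq_true_eq] at hc ⊢
  exact h _ hc

theorem nextFront_iter_mono (l : List (Int × Int)) (k : Nat) :
    ∀ S T, (∀ x ∈ S, x ∈ T) → ∀ x ∈ (nextFront l)^[k] S, x ∈ (nextFront l)^[k] T := by
  induction k with
  | zero => intro S T h; simpa using h
  | succ k ih =>
    intro S T h
    rw [Function.iterate_succ_apply, Function.iterate_succ_apply]
    exact ih _ _ (nextFront_mono l S T h)

theorem mem_childrenOf_mem_nextFront (l : List (Int × Int)) (v c : Int)
    (h : c ∈ childrenOf l v) : c ∈ nextFront l [v] := by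
  simp only [childrenOf, List.mem_map, List.mem_filter] at h
  obtain ⟨pr, ⟨hm, he⟩, hc⟩ := h
  simp only [nextFront, PySem.List.mem_dedup, List.mem_map, List.mem_filter]
  refine ⟨pr, ⟨hm, ?_⟩, hc⟩
  simp only [List.contains_eq_mem, List.mem_singleton, decide_eq_true_eq]
  simpa using he

-- empty iterated frontier ⇒ the DFS succeeds with that much fuel
theorem dfsF_isSome_of_front_empty (l : List (Int × Int)) :
    ∀ k v, (nextFront l)^[k] [v] = [] → (dfsF (childrenOf l) k v).isSome := by
  intro k
  induction k with
  | zero => intro v h; simp at h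
  | succ k ih =>
    intro v h
    rw [Function.iterate_succ_apply] at h
    have hch : ∀ c ∈ childrenOf l v, (dfsF (childrenOf l) k c).isSome := by
      intro c hc
      apply ih
      have hsub : ∀ x ∈ (nextFront l)^[k] [c], x ∈ (nextFront l)^[k] (nextFront l [v]) := by
        apply nextFront_iter_mono
        intro x hx
        simp only [List.mem_singleton] at hx
        rw [hx]
        exact mem_childrenOf_mem_nextFront l v c hc
      rw [h] at hsub
      exact List.eq_nil_iff_forall_not_mem.mpr (fun x hx => absurd (hsub x hx) List.not_mem_nil)
    have hall : ∀ cs, (∀ c ∈ cs, (dfsF (childrenOf l) k c).isSome) →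
        (dfsAll (childrenOf l) k cs).isSome := by
      intro cs
      induction cs with
      | nil => intro _; simp [dfsAll]
      | cons c cs ihc =>
        intro hcs
        have h1 := hcs c (by simp)
        obtain ⟨l₁, hl₁⟩ := Option.isSome_iff_exists.mp h1
        obtain ⟨r, hr⟩ := Option.isSome_iff_exists.mp (ihc (fun x hx => hcs x (by simp [hx])))
        simp [dfsAll, hl₁, hr]
    obtain ⟨t, ht⟩ := Option.isSome_iff_exists.mp (hall _ hch)
    simp [dfsF, ht]

-- size bound: with children lists of length ≤ m, a DFS with fuel f returns ≤ (m+1)^f pids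
theorem dfsF_length_le (ch : Int → List Int) (m : Nat) (hm : ∀ v, (ch v).length ≤ m) :
    ∀ f, (∀ v l, dfsF ch f v = some l → l.length ≤ (m + 1) ^ f) := by
  intro f
  induction f with
  | zero => intro v l h; simp [dfsF] at h
  | succ f ih =>
    have hall : ∀ cs t, dfsAll ch f cs = some t → t.length ≤ cs.length * (m + 1) ^ f := by
      intro cs
      induction cs with
      | nil => intro t h; simp [dfsAll] at h; subst h; simp
      | cons c cs ihc =>
        intro t h
        simp only [dfsAll, Option.bind_eq_bind, Option.bind_eq_some_iff] at h
        obtain ⟨l₁, h₁, r, hr, ht⟩ := h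
        simp only [Option.pure_def, Option.some.injEq] at ht
        have := ih c l₁ h₁
        have := ihc r hr
        rw [← ht]
        simp only [List.length_append, List.length_cons]
        calc l₁.length + r.length ≤ (m + 1) ^ f + cs.length * (m + 1) ^ f := by omega
          _ = (cs.length + 1) * (m + 1) ^ f := by ring
    intro v l h
    simp only [dfsF, Option.map_eq_some_iff] at h
    obtain ⟨t, hT, hl⟩ := h
    have h1 := hall (ch v) t hT
    have h2 := hm v
    have h3 : (1 : Nat) ≤ (m + 1) ^ f := Nat.one_le_pow _ _ (by omega)
    rw [← hl]
    simp only [List.length_cons]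
    calc t.length + 1 ≤ m * (m + 1) ^ f + (m + 1) ^ f := by
          have : (ch v).length * (m + 1) ^ f ≤ m * (m + 1) ^ f :=
            Nat.mul_le_mul_right _ h2
          omega
      _ = (m + 1) ^ (f + 1) := by ring

theorem childrenOf_length_le (l : List (Int × Int)) (v : Int) :
    (childrenOf l v).length ≤ l.length := by
  simp only [childrenOf, List.length_map]
  exact List.length_filter_le _ _

-- ===== VERDICT =====
theorem reapchildren_spec : Claim_equal_reapchildren := by
  unfold Claim_equal_reapchildren
  intro pid ppid kill _ hpre
  unfold Spec_reapchildren reapchildren reapchildren_alt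
  set l := pid.zip ppid with hl
  set n := pid.length with hn
  set ch := childrenOf l with hch
  -- the DFS succeeds with fuel n + 1
  have hsome := dfsF_isSome_of_front_empty l (n + 1) kill hpre
  obtain ⟨res, hres⟩ := Option.isSome_iff_exists.mp hsome
  -- A side
  have hgetA : ∀ v, (buildRelA l).getD v [] = ch v := by
    intro v
    unfold buildRelA
    rw [getD_buildRelA]
    simp [PySem.Dict.getD_empty, hch]
  have hconA : ∀ v, (buildRelA l).contains v = true ↔ ch v ≠ [] := by
    intro v
    unfold buildRelA
    rw [contains_buildRelA]
    simp only [PySem.Dict.contains_empty, Bool.false_or]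
    exact (childrenOf_ne_nil_iff l v).symm
  have hA := recurseA_eq_dfsF (buildRelA l) ch hgetA hconA (n + 1) kill [] res hres
  -- B side
  have hm : ∀ v, (ch v).length ≤ n := by
    intro v
    calc (ch v).length ≤ l.length := childrenOf_length_le l v
      _ ≤ n := by rw [hl, hn, List.length_zip]; omega
  have hlen : res.length ≤ (n + 1) ^ ((n : Nat) + 1) :=
    dfsF_length_le ch n hm (n + 1) kill res hres
  have hB := loopB_eq l ((n + 1) ^ (n + 1)) [kill] [res] []
    (List.Forall₂.cons ⟨n + 1, hres⟩ List.Forall₂.nil) (by simpa using hlen)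
  rw [hA, hB]
  simp
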